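-- pv_equiv track=rewrite | github.com/ZYH30/Causal-Uplift-Lab | getProxConAndRegVars.py | exists_directed_path_without
-- ===== SOURCE A (Python) =====
-- import collections
--
-- def exists_directed_path_without(
--     start: str,
--     end: str,
--     block_node: str,
--     graph_adj: dict
-- ) -> bool:
--     """
--     使用 BFS 检查是否存在从 'start' 到 'end' 的有向路径，
--     且该路径 *不* 经过 'block_node'。
--     """
--     if start == end:
--         return True
--
--     queue = collections.deque([start])
--     visited = {start}
--
--     while queue:
--         current = queue.popleft()
--
--         for neighbor in graph_adj.get(current, []):
--             if neighbor == end: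
--                 return True # 找到了！
--
--             if neighbor == block_node:
--                 continue # 路径被阻断，停止这个分支
--
--             if neighbor not in visited:
--                 visited.add(neighbor)
--                 queue.append(neighbor)
--
--     return False # 未找到路径
-- ===== SOURCE B (Python) =====
-- def exists_directed_path_without(start, end, block_node, graph_adj):
--     if start == end:
--         return True
--     reach = {start}
--     frontier = {start}
--     while frontier:
--         frontier = {v for u in frontier for v in graph_adj.get(u, [])
--                     if v != block_node and v not in reach}
--         reach |= frontier
--     return any(end in graph_adj.get(u, []) for u in reach)
-- ===== Notes on version B (the rewrite author's own statement) =====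
-- stated objective: alternative
-- what changed: Replaces the single-node FIFO BFS (deque + per-node early-exit on end) by a level-synchronous frontier saturation that first computes the whole reachable set avoiding block_node and only then checks whether any reachable node has an edge to end.
import Mathlib
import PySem

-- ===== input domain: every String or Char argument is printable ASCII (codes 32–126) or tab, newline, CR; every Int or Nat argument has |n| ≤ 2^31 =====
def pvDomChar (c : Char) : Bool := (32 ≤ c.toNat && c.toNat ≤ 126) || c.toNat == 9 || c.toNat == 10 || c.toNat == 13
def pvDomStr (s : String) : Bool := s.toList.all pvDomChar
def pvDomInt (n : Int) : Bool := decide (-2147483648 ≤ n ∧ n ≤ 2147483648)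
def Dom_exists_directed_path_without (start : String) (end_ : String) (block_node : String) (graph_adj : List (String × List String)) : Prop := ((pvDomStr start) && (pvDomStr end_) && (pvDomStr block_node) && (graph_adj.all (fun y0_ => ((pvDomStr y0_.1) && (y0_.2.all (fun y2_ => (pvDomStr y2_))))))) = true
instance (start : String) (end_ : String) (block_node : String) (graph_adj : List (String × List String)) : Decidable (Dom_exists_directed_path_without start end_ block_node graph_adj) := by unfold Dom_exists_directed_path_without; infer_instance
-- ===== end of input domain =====

-- B replaces A's single-node FIFO BFS by level-synchronous frontier saturation (compute the whole
-- reachable set avoiding block_node, then check for an edge into end_); objective: alternative, same cost.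

-- graph_adj.get(u, []) — shared by both ports (the same Python expression occurs in A and in B)
def pvNbrs (g : List (String × List String)) (u : String) : List String :=
  (PySem.Dict.mk g).getD u []

-- all adjacency-list entries of g (used only for the termination measures)
def pvVals (g : List (String × List String)) : List String :=
  g.flatMap (fun p => p.2)

-- number of candidate nodes not yet in s (termination measure)
def pvUnv (g : List (String × List String)) (s : List String) : Nat :=
  ((pvVals g).toFinset \ s.toFinset).card

lemma pvNbrs_subset (g : List (String × List String)) (u : String) :
    ∀ x ∈ pvNbrs g u, x ∈ pvVals g := by
  intro x hx
  unfold pvNbrs PySem.Dict.getD at hx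
  cases h : (PySem.Dict.mk g).get? u with
  | none => rw [h] at hx; simp at hx
  | some l =>
    rw [h] at hx; simp at hx
    have hmem : (u, l) ∈ (PySem.Dict.mk g).items := PySem.Dict.mem_items_of_get?_eq_some _ h
    exact List.mem_flatMap.mpr ⟨(u, l), hmem, hx⟩

lemma pvUnv_add_lt (g : List (String × List String)) (s : PySem.Set String) (n : String)
    (hn : n ∈ pvVals g) (hs : n ∉ s) :
    pvUnv g (PySem.Set.add s n) < pvUnv g s := by
  rw [PySem.Set.add_of_not_mem hs]
  unfold pvUnv
  apply Finset.card_lt_card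
  have hsub : (pvVals g).toFinset \ (s ++ [n]).toFinset ⊆ (pvVals g).toFinset \ s.toFinset := by
    intro x hx
    simp only [Finset.mem_sdiff, List.mem_toFinset, List.mem_append, List.mem_singleton] at hx ⊢
    tauto
  rw [Finset.ssubset_iff_of_subset hsub]
  refine ⟨n, ?_, ?_⟩
  · simp only [Finset.mem_sdiff, List.mem_toFinset]; exact ⟨hn, hs⟩
  · simp only [Finset.mem_sdiff, List.mem_toFinset, List.mem_append, List.mem_singleton]
    tauto

lemma pvUnv_update_le (g : List (String × List String)) :
    ∀ (xs : List String) (s : PySem.Set String), xs.Nodup →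
      (∀ x ∈ xs, x ∈ pvVals g ∧ x ∉ s) →
      pvUnv g (PySem.Set.update s xs) + xs.length ≤ pvUnv g s := by
  intro xs
  induction xs with
  | nil => intro s _ _; simp [PySem.Set.update]
  | cons x xs ih =>
    intro s hnd hx
    rw [PySem.Set.update_cons]
    have hx0 := hx x (by simp)
    have hlt := pvUnv_add_lt g s x hx0.1 hx0.2
    have hrest : ∀ y ∈ xs, y ∈ pvVals g ∧ y ∉ PySem.Set.add s x := by
      intro y hy
      refine ⟨(hx y (by simp [hy])).1, ?_⟩
      rw [PySem.Set.mem_add]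
      rintro (h | rfl)
      · exact (hx y (by simp [hy])).2 h
      · exact (List.nodup_cons.mp hnd).1 hy
    have := ih (PySem.Set.add s x) (List.nodup_cons.mp hnd).2 hrest
    simp only [List.length_cons]
    omega

-- ===== PORT A =====
-- the inner `for neighbor in graph_adj.get(current, [])` loop of A
def pvScan (end_ block : String) :
    List String → List String → PySem.Set String → Option (List String × PySem.Set String)
  | [], queue, visited => some (queue, visited)
  | n :: rest, queue, visited =>
    if n = end_ then none
    else if n = block then pvScan end_ block rest queue visited
    else if n ∈ visited then pvScan end_ block rest queue visited
    else pvScan end_ block rest (queue ++ [n]) (PySem.Set.add visited n)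

lemma pvScan_measure (end_ block : String) (g : List (String × List String)) :
    ∀ (ns queue : List String) (visited : PySem.Set String) q' v',
      (∀ n ∈ ns, n ∈ pvVals g) →
      pvScan end_ block ns queue visited = some (q', v') →
      q'.length + 2 * pvUnv g v' ≤ queue.length + 2 * pvUnv g visited := by
  intro ns
  induction ns with
  | nil => intro queue visited q' v' _ h; simp [pvScan] at h; simp [h.1, h.2]
  | cons n rest ih =>
    intro queue visited q' v' hn h
    simp only [pvScan] at h
    split_ifs at h with h1 h2 h3
    · exact ih queue visited q' v' (fun m hm => hn m (by simp [hm])) h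
    · exact ih queue visited q' v' (fun m hm => hn m (by simp [hm])) h
    · have := ih (queue ++ [n]) (PySem.Set.add visited n) q' v'
        (fun m hm => hn m (by simp [hm])) h
      have hlt := pvUnv_add_lt g visited n (hn n (by simp)) h3
      simp only [List.length_append, List.length_singleton] at this
      omega

-- the `while queue:` loop of A
def pvBfs (end_ block : String) (g : List (String × List String))
    (queue : List String) (visited : PySem.Set String) : Bool :=
  match queue with
  | [] => false
  | current :: rest =>
    match h : pvScan end_ block (pvNbrs g current) rest visited with
    | none => true
    | some (q', v') => pvBfs end_ block g q' v'
termination_by queue.length + 2 * pvUnv g visited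
decreasing_by
  have := pvScan_measure end_ block g (pvNbrs g current) rest visited q' v'
    (fun n hn => pvNbrs_subset g current n hn) h
  simp only [List.length_cons]
  omega

def exists_directed_path_without (start : String) (end_ : String) (block_node : String)
    (graph_adj : List (String × List String)) : Bool :=
  if start = end_ then true
  else pvBfs end_ block_node graph_adj [start] (PySem.Set.ofList [start])

-- ===== PORT B =====
-- the set comprehension {v for u in frontier for v in graph_adj.get(u, []) if v != block_node and v not in reach}
def pvNew (block : String) (g : List (String × List String))
    (reach frontier : PySem.Set String) : List String :=
  (frontier.flatMap (fun u => pvNbrs g u)).filter (fun v => decide (v ≠ block ∧ v ∉ reach))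

lemma pvNew_fresh (block : String) (g : List (String × List String))
    (reach frontier : PySem.Set String) :
    ∀ x ∈ PySem.Set.ofList (pvNew block g reach frontier), x ∈ pvVals g ∧ x ∉ reach := by
  intro x hx
  rw [PySem.Set.mem_ofList] at hx
  unfold pvNew at hx
  simp only [List.mem_filter, List.mem_flatMap, decide_eq_true_eq] at hx
  obtain ⟨⟨u, _, hxu⟩, _, hxr⟩ := hx
  exact ⟨pvNbrs_subset g u x hxu, hxr⟩

-- the `while frontier:` loop of B
def pvSat (block : String) (g : List (String × List String))
    (reach frontier : PySem.Set String) : PySem.Set String :=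
  if frontier = [] then reach
  else
    pvSat block g
      (PySem.Set.union reach (PySem.Set.ofList (pvNew block g reach frontier)))
      (PySem.Set.ofList (pvNew block g reach frontier))
termination_by pvUnv g reach + frontier.length
decreasing_by
  rename_i hf
  have hnd : (PySem.Set.ofList (pvNew block g reach frontier)).Nodup := PySem.Set.nodup_ofList _
  have := pvUnv_update_le g (PySem.Set.ofList (pvNew block g reach frontier)) reach hnd
    (pvNew_fresh block g reach frontier)
  have hfl : 0 < frontier.length := List.length_pos_of_ne_nil hf
  show pvUnv g (PySem.Set.union reach (PySem.Set.ofList (pvNew block g reach frontier)))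
        + (PySem.Set.ofList (pvNew block g reach frontier)).length
      < pvUnv g reach + frontier.length
  rw [PySem.Set.union]
  omega

def exists_directed_path_without_alt (start : String) (end_ : String) (block_node : String)
    (graph_adj : List (String × List String)) : Bool :=
  if start = end_ then true
  else
    (pvSat block_node graph_adj (PySem.Set.ofList [start]) (PySem.Set.ofList [start])).any
      (fun u => (pvNbrs graph_adj u).contains end_)

-- ===== PRECONDITION & SPEC =====
def Spec_exists_directed_path_without (start : String) (end_ : String) (block_node : String) (graph_adj : List (String × List String)) (out : Bool) : Prop := out = exists_directed_path_without_alt start end_ block_node graph_adj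
instance (start : String) (end_ : String) (block_node : String) (graph_adj : List (String × List String)) (out : Bool) : Decidable (Spec_exists_directed_path_without start end_ block_node graph_adj out) := by unfold Spec_exists_directed_path_without; infer_instance

-- ===== CLAIM (what is proved, stated in full; the proofs are below) =====
def Claim_equal_exists_directed_path_without : Prop := ∀ (start : String) (end_ : String) (block_node : String) (graph_adj : List (String × List String)), Dom_exists_directed_path_without start end_ block_node graph_adj → Spec_exists_directed_path_without start end_ block_node graph_adj (exists_directed_path_without start end_ block_node graph_adj)

-- ===== LEMMAS AND PROOFS =====

-- the saturation result contains its initial reach set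
lemma pvSat_mono (block : String) (g : List (String × List String)) :
    ∀ (reach frontier : PySem.Set String), ∀ x ∈ reach, x ∈ pvSat block g reach frontier := by
  
  intro reach frontier
  induction reach, frontier using pvSat.induct block g with
  | case1 reach => intro x hx; rw [pvSat, if_pos rfl]; exact hx
  | case2 reach frontier hf ih =>
    intro x hx
    rw [pvSat, if_neg hf]
    exact ih x (by rw [PySem.Set.mem_union]; exact Or.inl hx)


-- the saturation result is contained in every set S closed under non-blocked edges
lemma pvSat_min (block : String) (g : List (String × List String)) (S : String → Prop)
    (hS : ∀ u, S u → ∀ v ∈ pvNbrs g u, v ≠ block → S v) :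
    ∀ (reach frontier : PySem.Set String),
      (∀ x ∈ reach, S x) → (∀ x ∈ frontier, S x) →
      ∀ x ∈ pvSat block g reach frontier, S x := by
  
  intro reach frontier
  induction reach, frontier using pvSat.induct block g with
  | case1 reach => intro hr _ x hx; rw [pvSat, if_pos rfl] at hx; exact hr x hx
  | case2 reach frontier hf ih =>
    intro hr hfr x hx
    rw [pvSat, if_neg hf] at hx
    have hnew : ∀ y ∈ PySem.Set.ofList (pvNew block g reach frontier), S y := by
      intro y hy
      rw [PySem.Set.mem_ofList] at hy
      unfold pvNew at hy
      simp only [List.mem_filter, List.mem_flatMap, decide_eq_true_eq] at hy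
      obtain ⟨⟨u, hu, hyu⟩, hne, _⟩ := hy
      exact hS u (hfr u hu) y hyu hne
    refine ih ?_ hnew x hx
    intro y hy
    rw [PySem.Set.mem_union] at hy
    exact hy.elim (hr y) (hnew y)


-- the saturation result is closed under non-blocked edges
lemma pvSat_closed (block : String) (g : List (String × List String)) :
    ∀ (reach frontier : PySem.Set String),
      (∀ x ∈ frontier, x ∈ reach) →
      (∀ u ∈ reach, u ∈ frontier ∨ ∀ v ∈ pvNbrs g u, v ≠ block → v ∈ reach) →
      ∀ u ∈ pvSat block g reach frontier, ∀ v ∈ pvNbrs g u, v ≠ block →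
        v ∈ pvSat block g reach frontier := by
  
  intro reach frontier
  induction reach, frontier using pvSat.induct block g with
  | case1 reach =>
    intro _ hcl u hu v hv hne
    rw [pvSat, if_pos rfl] at hu ⊢
    exact ((hcl u hu).resolve_left (by simp)) v hv hne
  | case2 reach frontier hf ih =>
    intro hfr hcl
    rw [pvSat, if_neg hf]
    apply ih
    · intro x hx; rw [PySem.Set.mem_union]; exact Or.inr hx
    · intro u hu
      rw [PySem.Set.mem_union] at hu
      rcases hu with hu | hu
      · rcases hcl u hu with hu2 | hu2
        · right
          intro v hv hne
          rw [PySem.Set.mem_union]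
          by_cases hvr : v ∈ reach
          · exact Or.inl hvr
          · right
            rw [PySem.Set.mem_ofList]
            unfold pvNew
            simp only [List.mem_filter, List.mem_flatMap, decide_eq_true_eq]
            exact ⟨⟨u, hu2, hv⟩, hne, hvr⟩
        · right
          intro v hv hne
          rw [PySem.Set.mem_union]
          exact Or.inl (hu2 v hv hne)
      · exact Or.inl hu


-- if the inner loop exits early, end_ was among the neighbours
lemma pvScan_none (end_ block : String) :
    ∀ (ns queue : List String) (visited : PySem.Set String),
      pvScan end_ block ns queue visited = none → end_ ∈ ns := by
  
  intro ns
  induction ns with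
  | nil => intro queue visited h; simp [pvScan] at h
  | cons n rest ih =>
    intro queue visited h
    simp only [pvScan] at h
    split_ifs at h with h1 h2 h3
    · exact List.mem_cons.mpr (Or.inl h1.symm)
    · exact List.mem_cons.mpr (Or.inr (ih _ _ h))
    · exact List.mem_cons.mpr (Or.inr (ih _ _ h))
    · exact List.mem_cons.mpr (Or.inr (ih _ _ h))


-- what the inner loop guarantees when it completes normally
lemma pvScan_spec (end_ block : String) :
    ∀ (ns queue : List String) (visited : PySem.Set String) q' v',
      pvScan end_ block ns queue visited = some (q', v') →
      (∀ n ∈ ns, n ≠ end_) ∧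
      (∀ x ∈ visited, x ∈ v') ∧
      (∀ n ∈ ns, n = block ∨ n ∈ v') ∧
      (∀ x ∈ q', x ∈ queue ∨ x ∈ v') ∧
      (∀ x ∈ v', x ∈ visited ∨ (x ∈ ns ∧ x ≠ block)) ∧
      (∀ x ∈ v', x ∈ visited ∨ x ∈ q') ∧
      (∀ x ∈ queue, x ∈ q') := by
  
  intro ns
  induction ns with
  | nil =>
    intro queue visited q' v' h
    simp only [pvScan, Option.some.injEq, Prod.mk.injEq] at h
    obtain ⟨rfl, rfl⟩ := h
    exact ⟨by simp, fun x hx => hx, by simp, fun x hx => Or.inl hx,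
      fun x hx => Or.inl hx, fun x hx => Or.inl hx, fun x hx => hx⟩
  | cons n rest ih =>
    intro queue visited q' v' h
    simp only [pvScan] at h
    split_ifs at h with h1 h2 h3
    · obtain ⟨C1, C2, C3, C4, C5, C6, C7⟩ := ih queue visited q' v' h
      refine ⟨?_, C2, ?_, C4, ?_, C6, C7⟩
      · intro m hm; rcases List.mem_cons.mp hm with rfl | hm
        · exact h1
        · exact C1 m hm
      · intro m hm; rcases List.mem_cons.mp hm with rfl | hm
        · exact Or.inl h2
        · exact C3 m hm
      · intro x hx
        rcases C5 x hx with hx2 | ⟨hx2, hx3⟩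
        · exact Or.inl hx2
        · exact Or.inr ⟨List.mem_cons.mpr (Or.inr hx2), hx3⟩
    · obtain ⟨C1, C2, C3, C4, C5, C6, C7⟩ := ih queue visited q' v' h
      refine ⟨?_, C2, ?_, C4, ?_, C6, C7⟩
      · intro m hm; rcases List.mem_cons.mp hm with rfl | hm
        · exact h1
        · exact C1 m hm
      · intro m hm; rcases List.mem_cons.mp hm with rfl | hm
        · exact Or.inr (C2 m h3)
        · exact C3 m hm
      · intro x hx
        rcases C5 x hx with hx2 | ⟨hx2, hx3⟩
        · exact Or.inl hx2
        · exact Or.inr ⟨List.mem_cons.mpr (Or.inr hx2), hx3⟩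
    · obtain ⟨C1, C2, C3, C4, C5, C6, C7⟩ := ih (queue ++ [n]) (PySem.Set.add visited n) q' v' h
      have hmemadd : ∀ x ∈ visited, x ∈ PySem.Set.add visited n :=
        fun x hx => (PySem.Set.mem_add visited n x).mpr (Or.inl hx)
      have hnadd : n ∈ PySem.Set.add visited n :=
        (PySem.Set.mem_add visited n n).mpr (Or.inr rfl)
      have hnv' : n ∈ v' := C2 n hnadd
      refine ⟨?_, ?_, ?_, ?_, ?_, ?_, ?_⟩
      · intro m hm; rcases List.mem_cons.mp hm with rfl | hm
        · exact h1
        · exact C1 m hm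
      · intro x hx; exact C2 x (hmemadd x hx)
      · intro m hm; rcases List.mem_cons.mp hm with rfl | hm
        · exact Or.inr hnv'
        · exact C3 m hm
      · intro x hx
        rcases C4 x hx with hx2 | hx2
        · rcases List.mem_append.mp hx2 with hx3 | hx3
          · exact Or.inl hx3
          · exact Or.inr (List.mem_singleton.mp hx3 ▸ hnv')
        · exact Or.inr hx2
      · intro x hx
        rcases C5 x hx with hx2 | ⟨hx2, hx3⟩
        · rcases (PySem.Set.mem_add visited n x).mp hx2 with hx4 | rfl
          · exact Or.inl hx4
          · exact Or.inr ⟨List.mem_cons.mpr (Or.inl rfl), h2⟩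
        · exact Or.inr ⟨List.mem_cons.mpr (Or.inr hx2), hx3⟩
      · intro x hx
        rcases C6 x hx with hx2 | hx2
        · rcases (PySem.Set.mem_add visited n x).mp hx2 with hx4 | hx5
          · exact Or.inl hx4
          · rw [hx5]; exact Or.inr (C7 n (List.mem_append.mpr (Or.inr (List.mem_singleton.mpr rfl))))
        · exact Or.inr hx2
      · intro x hx; exact C7 x (List.mem_append.mpr (Or.inl hx))


-- BFS loop invariant: A's answer, read through any closed superset RR of the reachable set
lemma pvBfs_correct (end_ block : String) (g : List (String × List String)) (RR : List String)
    (hclosed : ∀ u ∈ RR, ∀ v ∈ pvNbrs g u, v ≠ block → v ∈ RR) :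
    ∀ (queue : List String) (visited : PySem.Set String),
      (∀ x ∈ queue, x ∈ visited) →
      (∀ x ∈ visited, x ∈ RR) →
      (∀ u ∈ visited, u ∈ queue ∨ (end_ ∉ pvNbrs g u ∧ ∀ v ∈ pvNbrs g u, v = block ∨ v ∈ visited)) →
      (pvBfs end_ block g queue visited = true → ∃ u ∈ RR, end_ ∈ pvNbrs g u) ∧
      (pvBfs end_ block g queue visited = false → ∃ W : List String,
        (∀ x ∈ visited, x ∈ W) ∧
        (∀ u ∈ W, ∀ v ∈ pvNbrs g u, v ≠ block → v ∈ W) ∧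
        (∀ u ∈ W, end_ ∉ pvNbrs g u)) := by
  
  intro queue visited
  induction queue, visited using pvBfs.induct end_ block g with
  | case1 visited =>
    intro hq hv hp
    constructor
    · intro h; rw [pvBfs] at h; simp at h
    · intro _
      refine ⟨visited, fun x hx => hx, ?_, ?_⟩
      · intro u hu v hv2 hne
        exact (((hp u hu).resolve_left (by simp)).2 v hv2).resolve_left hne
      · intro u hu
        exact ((hp u hu).resolve_left (by simp)).1
  | case2 visited current rest hscan =>
    intro hq hv hp
    constructor
    · intro _
      exact ⟨current, hv current (hq current (List.mem_cons.mpr (Or.inl rfl))),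
        pvScan_none end_ block _ _ _ hscan⟩
    · intro h
      have htrue : pvBfs end_ block g (current :: rest) visited = true := by
        rw [pvBfs]
        split
        · rfl
        · rename_i q2 v2 h2; rw [hscan] at h2; cases h2
      rw [htrue] at h; cases h
  | case3 visited current rest q' v' hscan ih =>
    intro hq hv hp
    obtain ⟨C1, C2, C3, C4, C5, C6, C7⟩ := pvScan_spec end_ block (pvNbrs g current) rest visited q' v' hscan
    have hcurv : current ∈ visited := hq current (List.mem_cons.mpr (Or.inl rfl))
    have hq' : ∀ x ∈ q', x ∈ v' := by
      intro x hx
      rcases C4 x hx with h | h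
      · exact C2 _ (hq x (List.mem_cons.mpr (Or.inr h)))
      · exact h
    have hv' : ∀ x ∈ v', x ∈ RR := by
      intro x hx
      rcases C5 x hx with h | ⟨hn, hb⟩
      · exact hv x h
      · exact hclosed current (hv current hcurv) x hn hb
    have hp' : ∀ u ∈ v', u ∈ q' ∨ (end_ ∉ pvNbrs g u ∧ ∀ v ∈ pvNbrs g u, v = block ∨ v ∈ v') := by
      intro u hu
      rcases C6 u hu with h | h
      · rcases hp u h with hmem | ⟨he, hcl⟩
        · rcases List.mem_cons.mp hmem with rfl | hr
          · exact Or.inr ⟨fun hc => C1 end_ hc rfl, fun v hv0 => C3 v hv0⟩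
          · exact Or.inl (C7 u hr)
        · exact Or.inr ⟨he, fun v hv0 => (hcl v hv0).imp id (fun hx => C2 v hx)⟩
      · exact Or.inl h
    have hrec := ih hq' hv' hp'
    have heq : pvBfs end_ block g (current :: rest) visited = pvBfs end_ block g q' v' := by
      rw [pvBfs]
      split
      · rename_i h2; rw [hscan] at h2; cases h2
      · rename_i q2 v2 h2
        rw [hscan] at h2
        obtain ⟨rfl, rfl⟩ := Prod.mk.injEq .. ▸ Option.some.inj h2
        rfl
    constructor
    · intro h; exact hrec.1 (heq ▸ h)
    · intro h
      obtain ⟨W, hW1, hW2, hW3⟩ := hrec.2 (heq ▸ h)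
      exact ⟨W, fun x hx => hW1 x (C2 x hx), hW2, hW3⟩


-- ===== VERDICT (by name: the statement is the Claim_ definition above) =====
theorem exists_directed_path_without_spec : Claim_equal_exists_directed_path_without := by
  
  intro start end_ block g _
  unfold Spec_exists_directed_path_without exists_directed_path_without exists_directed_path_without_alt
  by_cases hse : start = end_
  · simp [hse]
  · simp only [if_neg hse]
    have hstart : start ∈ pvSat block g (PySem.Set.ofList [start]) (PySem.Set.ofList [start]) :=
      pvSat_mono block g _ _ start (by rw [PySem.Set.mem_ofList]; exact List.mem_singleton.mpr rfl)
    have hcl : ∀ u ∈ pvSat block g (PySem.Set.ofList [start]) (PySem.Set.ofList [start]),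
        ∀ v ∈ pvNbrs g u, v ≠ block → v ∈ pvSat block g (PySem.Set.ofList [start]) (PySem.Set.ofList [start]) :=
      pvSat_closed block g _ _ (fun x hx => hx) (fun u hu => Or.inl hu)
    have H := pvBfs_correct end_ block g _ hcl [start] (PySem.Set.ofList [start])
      (fun x hx => by rw [PySem.Set.mem_ofList]; exact hx)
      (fun x hx => by
        rw [PySem.Set.mem_ofList] at hx
        rw [List.mem_singleton.mp hx]
        exact hstart)
      (fun u hu => Or.inl (by rw [PySem.Set.mem_ofList] at hu; exact hu))
    cases hb : pvBfs end_ block g [start] (PySem.Set.ofList [start]) with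
    | true =>
      obtain ⟨u, huR, hend⟩ := H.1 hb
      symm
      rw [List.any_eq_true]
      exact ⟨u, huR, List.contains_iff_mem.mpr hend⟩
    | false =>
      obtain ⟨W, hW1, hW2, hW3⟩ := H.2 hb
      symm
      rw [List.any_eq_false]
      intro u huR hc
      have huW : u ∈ W :=
        pvSat_min block g (· ∈ W) (fun a ha v hv hne => hW2 a ha v hv hne) _ _
          (fun x hx => hW1 x hx) (fun x hx => hW1 x hx) u huR
      exact hW3 u huW (List.contains_iff_mem.mp hc)
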